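-- pv_equiv track=rewrite | github.com/kaushik-jatin14/Aethelgard-AI-Engine | backend/routes/game.py | region_connections
-- ===== SOURCE A (Python) =====
-- VALID_LOCATIONS = [
--     "The Nexus Point",
--     "Canyon of Whispers",
--     "Ruins of Oakhaven",
--     "The Ashen Wastes",
--     "Crystal Caves",
--     "The Crimson Peak",
--     "Silent Marsh",
--     "The Obsidian Citadel",
--     "Forgotten Grove",
--     "The Iron Bridge",
--     "Valley of Bones",
--     "The Weeping Falls",
--     "Temple of the Void",
--     "The Shimmering Sands",
--     "Gloomwood Forest",
--     "The Howling Abyss",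
--     "Sanctuary of Light",
--     "The Molten Core",
--     "Frozen Tundra",
--     "The Whispering Woods",
--     "Dragon's Roost",
--     "The Sunken City",
--     "The Clockwork Tower",
--     "The Blightlands",
--     "The Final Gate",
-- ]
--
-- def region_connections(location: str) -> list[str]:
--     index = VALID_LOCATIONS.index(location)
--     connections = {
--         VALID_LOCATIONS[(index - 1) % len(VALID_LOCATIONS)],
--         VALID_LOCATIONS[(index + 1) % len(VALID_LOCATIONS)],
--         VALID_LOCATIONS[(index + 5) % len(VALID_LOCATIONS)],
--     }
--     return [name for name in VALID_LOCATIONS if name in connections][:3]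
-- ===== SOURCE B (Python) =====
-- VALID_LOCATIONS = [
--     "The Nexus Point",
--     "Canyon of Whispers",
--     "Ruins of Oakhaven",
--     "The Ashen Wastes",
--     "Crystal Caves",
--     "The Crimson Peak",
--     "Silent Marsh",
--     "The Obsidian Citadel",
--     "Forgotten Grove",
--     "The Iron Bridge",
--     "Valley of Bones",
--     "The Weeping Falls",
--     "Temple of the Void",
--     "The Shimmering Sands",
--     "Gloomwood Forest",
--     "The Howling Abyss",
--     "Sanctuary of Light",
--     "The Molten Core",
--     "Frozen Tundra",
--     "The Whispering Woods",
--     "Dragon's Roost",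
--     "The Sunken City",
--     "The Clockwork Tower",
--     "The Blightlands",
--     "The Final Gate",
-- ]
--
-- _N = len(VALID_LOCATIONS)
--
-- # Adjacency table built once at import time: j is connected to i when the
-- # cyclic offset (j - i) % N is 1, 5 or N-1; enumerating j in list order
-- # yields the names already in VALID_LOCATIONS order, no set and no sort.
-- CONNECTIONS = {}
-- for _i, _name in enumerate(VALID_LOCATIONS):
--     CONNECTIONS[_name] = [
--         other
--         for _j, other in enumerate(VALID_LOCATIONS)
--         if (_j - _i) % _N in (1, 5, _N - 1)
--     ]
--
-- def region_connections(location: str) -> list[str]: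
--     return CONNECTIONS[location]
-- ===== Notes on version B (the rewrite author's own statement) =====
-- stated objective: alternative
-- what changed: B precomputes once, at module load, an adjacency dict mapping each location to its neighbors (j connected to i when (j-i) % N is 1, 5 or N-1, enumerated in list order, so no set, no sort, no per-call index arithmetic), and the function itself is a single dict lookup; A recomputes the neighbor set and filters the whole list on every call.
import Mathlib
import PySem

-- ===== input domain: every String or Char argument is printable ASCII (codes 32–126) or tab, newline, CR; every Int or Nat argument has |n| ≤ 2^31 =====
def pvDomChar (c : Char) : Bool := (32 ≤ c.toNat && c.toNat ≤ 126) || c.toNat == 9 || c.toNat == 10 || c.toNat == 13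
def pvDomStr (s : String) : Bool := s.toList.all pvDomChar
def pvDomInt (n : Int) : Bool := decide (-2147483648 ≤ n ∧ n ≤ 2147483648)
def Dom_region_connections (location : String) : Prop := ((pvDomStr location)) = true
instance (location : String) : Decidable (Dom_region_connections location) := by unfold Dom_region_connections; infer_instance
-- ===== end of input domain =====

-- B replaces A's per-call neighbor-set computation and full-list filter with a
-- one-time adjacency table (offset test (j-i) % N ∈ {1,5,N-1}) and a dict lookup
-- (objective: alternative decomposition).

def pvVALID : List String := [
  "The Nexus Point",
  "Canyon of Whispers",
  "Ruins of Oakhaven",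
  "The Ashen Wastes",
  "Crystal Caves",
  "The Crimson Peak",
  "Silent Marsh",
  "The Obsidian Citadel",
  "Forgotten Grove",
  "The Iron Bridge",
  "Valley of Bones",
  "The Weeping Falls",
  "Temple of the Void",
  "The Shimmering Sands",
  "Gloomwood Forest",
  "The Howling Abyss",
  "Sanctuary of Light",
  "The Molten Core",
  "Frozen Tundra",
  "The Whispering Woods",
  "Dragon's Roost",
  "The Sunken City",
  "The Clockwork Tower",
  "The Blightlands",
  "The Final Gate"]

-- ===== PORT A =====
def region_connections (location : String) : List String :=
  match PySem.List.index? pvVALID location with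
  | none => []   -- Python raises ValueError here; excluded by Pre_
  | some index =>
    let n : Int := (pvVALID.length : Int)
    -- indices above are always in range, so the .getD "" never fires
    let connections : PySem.Set String := PySem.Set.ofList
      [ (PySem.List.pyGet? pvVALID (PySem.Int.mod ((index : Int) - 1) n)).getD "",
        (PySem.List.pyGet? pvVALID (PySem.Int.mod ((index : Int) + 1) n)).getD "",
        (PySem.List.pyGet? pvVALID (PySem.Int.mod ((index : Int) + 5) n)).getD "" ]
    (pvVALID.filter (fun name => connections.contains name)).take 3

-- ===== PORT B =====
-- Module-level table of Source B, built by the same double enumerate loop: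
-- j is connected to i when (j - i) % N is 1, 5 or N-1.
def pvCONNECTIONS : PySem.Dict String (List String) :=
  (PySem.List.enumerate pvVALID).foldl
    (fun d (p : Int × String) =>
      d.insert p.2
        ((PySem.List.enumerate pvVALID).filterMap
          (fun (q : Int × String) =>
            let off := PySem.Int.mod (q.1 - p.1) (pvVALID.length : Int)
            if off = 1 ∨ off = 5 ∨ off = (pvVALID.length : Int) - 1 then some q.2 else none)))
    PySem.Dict.empty

def region_connections_alt (location : String) : List String :=
  match pvCONNECTIONS.get? location with
  | none => []   -- Python raises KeyError here; excluded by Pre_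
  | some conns => conns

-- ===== PRECONDITION & SPEC =====
-- Python raises (A: ValueError, B: KeyError) when location is not one of the 25 valid names.
def Pre_region_connections (location : String) : Prop := location ∈ pvVALID
instance (location : String) : Decidable (Pre_region_connections location) := by
  unfold Pre_region_connections; infer_instance
def pvWitness_region_connections : String := "The Nexus Point"

def Spec_region_connections (location : String) (out : List String) : Prop := out = region_connections_alt location
instance (location : String) (out : List String) : Decidable (Spec_region_connections location out) := by unfold Spec_region_connections; infer_instance

-- ===== CLAIM (what is proved, stated in full; the proofs are below) =====
def Claim_equal_region_connections : Prop := ∀ (location : String), Dom_region_connections location → Pre_region_connections location → Spec_region_connections location (region_connections location)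

-- ===== LEMMAS AND PROOFS =====

-- ===== VERDICT (by name: the statement is the Claim_ definition above) =====
theorem region_connections_spec : Claim_equal_region_connections := by
  intro location _ hpre
  unfold Pre_region_connections pvVALID at hpre
  unfold Spec_region_connections
  fin_cases hpre <;> decide
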